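-- pv_equiv track=rewrite | github.com/marekwolski/obsidian_orphans | reporting.py | filter_list_by_endings
-- ===== SOURCE A (Python) =====
-- def filter_list_by_endings(A, B):
--   """
--   Generates a new list C containing entries from list A that do not have
--   an "ends with" match from any string in list B.
--
--   Args:
--     A: A list of strings.
--     B: A list of strings representing potential endings.
--
--   Returns:
--     A new list C containing strings from A that don't end with any string in B.
--   """
--   C = []
--   for a_item in A:
--     ends_with_match = False
--     for b_item in B:
--       if str(a_item).endswith(b_item):
--         ends_with_match = True
--         break  # No need to check other endings if a match is found
--     if not ends_with_match:
--       C.append(a_item)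
--   return C
-- ===== SOURCE B (Python) =====
-- def filter_list_by_endings(A, B):
--   """
--   Suffix-set rewrite: build a hash set of B and the distinct ending lengths
--   once; each item is tested by looking up only its suffixes of those lengths.
--   """
--   S = set(B)
--   lengths = sorted({len(b) for b in B})
--   C = []
--   for a_item in A:
--     s = str(a_item)
--     n = len(s)
--     if not any(k <= n and s[n - k:] in S for k in lengths):
--       C.append(a_item)
--   return C
-- ===== Notes on version B (the rewrite author's own statement) =====
-- stated objective: faster
-- what changed: Instead of testing every item against every ending with endswith, B builds a hash set of B and the distinct ending lengths once, then for each item looks up only its suffixes of those lengths in the set.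
import Mathlib
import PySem

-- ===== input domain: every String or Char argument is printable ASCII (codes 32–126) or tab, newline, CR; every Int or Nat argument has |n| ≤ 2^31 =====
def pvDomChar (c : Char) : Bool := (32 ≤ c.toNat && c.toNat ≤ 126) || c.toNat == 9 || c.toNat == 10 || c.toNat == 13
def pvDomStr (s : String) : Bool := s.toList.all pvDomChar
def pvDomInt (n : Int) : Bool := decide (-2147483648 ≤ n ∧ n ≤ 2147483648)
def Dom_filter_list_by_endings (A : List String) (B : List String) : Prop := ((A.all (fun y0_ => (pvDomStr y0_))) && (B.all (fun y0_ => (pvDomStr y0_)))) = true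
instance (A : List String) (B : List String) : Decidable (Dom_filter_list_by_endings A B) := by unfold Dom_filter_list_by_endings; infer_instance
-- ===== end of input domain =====

-- B replaces the per-item scan over all of B by one hash set of B plus the distinct
-- ending lengths, looking up only the item's suffixes of those lengths (objective: faster).

-- ===== PORT A =====
-- inner 'for b_item in B: … break' loop: returns True on the first matching ending
def pvEndsLoop (a_item : String) : List String → Bool
  | [] => false
  | b_item :: rest =>
      if PySem.Str.endswith a_item b_item then true else pvEndsLoop a_item rest

def filter_list_by_endings (A : List String) (B : List String) : List String :=
  A.foldl (fun C a_item =>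
    let ends_with_match := pvEndsLoop a_item B
    if !ends_with_match then C ++ [a_item] else C) []

-- ===== PORT B =====
def filter_list_by_endings_alt (A : List String) (B : List String) : List String :=
  let S : PySem.Set String := PySem.Set.ofList B
  let lengths : List Int :=
    PySem.List.sorted (PySem.Set.ofList (B.map PySem.Str.len)) (fun k => k) false
  A.foldl (fun C a_item =>
    let n : Int := PySem.Str.len a_item
    if !(lengths.any (fun k =>
          decide (k ≤ n) && PySem.Set.contains S (PySem.Str.slice a_item (some (n - k)) none)))
    then C ++ [a_item] else C) []

-- ===== PRECONDITION & SPEC =====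
def Spec_filter_list_by_endings (A : List String) (B : List String) (out : List String) : Prop := out = filter_list_by_endings_alt A B
instance (A : List String) (B : List String) (out : List String) : Decidable (Spec_filter_list_by_endings A B out) := by unfold Spec_filter_list_by_endings; infer_instance

-- ===== CLAIM (what is proved, stated in full; the proofs are below) =====
def Claim_equal_filter_list_by_endings : Prop := ∀ (A : List String) (B : List String), Dom_filter_list_by_endings A B → Spec_filter_list_by_endings A B (filter_list_by_endings A B)

-- ===== LEMMAS AND PROOFS =====

-- A's inner loop is 'some ending of B is a suffix'
theorem pvEndsLoop_eq_true_iff (a : String) (B : List String) :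
    pvEndsLoop a B = true ↔ ∃ b ∈ B, b.toList <:+ a.toList := by
  induction B with
  | nil => simp [pvEndsLoop]
  | cons b rest ih =>
      rw [pvEndsLoop]
      by_cases h : PySem.Str.endswith a b = true
      · rw [if_pos h]
        constructor
        · intro _
          exact ⟨b, List.mem_cons_self,
            (PySem.Chars.endswith_iff a.toList b.toList).mp
              ((PySem.Str.endswith_eq a b) ▸ h)⟩
        · intro _; rfl
      · rw [if_neg h, ih]
        constructor
        · rintro ⟨x, hx, hs⟩; exact ⟨x, List.mem_cons_of_mem _ hx, hs⟩
        · rintro ⟨x, hx, hs⟩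
          rcases List.mem_cons.mp hx with rfl | hx'
          · exact absurd ((PySem.Str.endswith_eq a x) ▸
              (PySem.Chars.endswith_iff a.toList x.toList).mpr hs) h
          · exact ⟨x, hx', hs⟩

-- B's suffix-lookup test computes the same boolean as A's inner loop
theorem pvCond_eq (B : List String) (a : String) :
    (PySem.List.sorted (PySem.Set.ofList (B.map PySem.Str.len)) (fun k => k) false).any
      (fun k => decide (k ≤ PySem.Str.len a) &&
        PySem.Set.contains (PySem.Set.ofList B)
          (PySem.Str.slice a (some (PySem.Str.len a - k)) none))
      = pvEndsLoop a B := by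
  cases hb : pvEndsLoop a B with
  | false =>
    -- loop false: no suffix lookup can succeed
    rw [← Bool.not_eq_true] at hb
    rw [pvEndsLoop_eq_true_iff] at hb
    push Not at hb
    apply List.any_eq_false.mpr
    intro k hk
    simp only [Bool.and_eq_true, decide_eq_true_eq, PySem.Set.contains_iff, not_and]
    intro _ hmem
    have hmemB : PySem.Str.slice a (some (PySem.Str.len a - k)) none ∈ B :=
      (PySem.Set.mem_ofList B _).mp hmem
    refine hb _ hmemB ?_
    -- the slice is by construction a suffix of a
    have hkB : k ∈ B.map PySem.Str.len :=
      (PySem.Set.mem_ofList (B.map PySem.Str.len) k).mp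
        ((PySem.List.mem_sorted _ _ _ k).mp hk)
    rcases List.mem_map.mp hkB with ⟨b0, _, rfl⟩
    rcases le_or_gt 0 (PySem.Str.len a - PySem.Str.len b0) with hge | hlt
    · rw [show (PySem.Str.slice a (some (PySem.Str.len a - PySem.Str.len b0)) none).toList
            = a.toList.drop (PySem.Str.len a - PySem.Str.len b0).toNat from by
          rw [PySem.Str.toList_slice, PySem.Chars.slice_eq_listSlice,
            PySem.List.slice_from _ hge]]
      exact List.drop_suffix _ _
    · -- negative start clamps: still a suffix (in fact here len a < len b0)
      rw [show (PySem.Str.slice a (some (PySem.Str.len a - PySem.Str.len b0)) none).toList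
            = a.toList.drop (PySem.List.clampIdx a.toList.length
                (PySem.Str.len a - PySem.Str.len b0)) from by
          rw [PySem.Str.toList_slice, PySem.Chars.slice_eq_listSlice,
            PySem.List.slice_some_none]]
      exact List.drop_suffix _ _
  | true =>
    rw [pvEndsLoop_eq_true_iff] at hb
    rcases hb with ⟨b, hbB, hsuf⟩
    apply List.any_eq_true.mpr
    refine ⟨PySem.Str.len b, ?_, ?_⟩
    · exact (PySem.List.mem_sorted _ _ _ _).mpr
        ((PySem.Set.mem_ofList _ _).mpr (List.mem_map_of_mem hbB))
    · rcases hsuf with ⟨t, ht⟩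
      have hlen : b.toList.length ≤ a.toList.length := by
        rw [← ht]; simp
      have hle : PySem.Str.len b ≤ PySem.Str.len a := by
        rw [PySem.Str.len_eq, PySem.Str.len_eq]; exact_mod_cast hlen
      have hge : (0:Int) ≤ PySem.Str.len a - PySem.Str.len b := by omega
      have hslice : PySem.Str.slice a (some (PySem.Str.len a - PySem.Str.len b)) none = b := by
        apply String.toList_inj.mp
        rw [PySem.Str.toList_slice, PySem.Chars.slice_eq_listSlice,
          PySem.List.slice_from _ hge]
        have htn : (PySem.Str.len a - PySem.Str.len b).toNat
            = a.toList.length - b.toList.length := by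
          rw [PySem.Str.len_eq, PySem.Str.len_eq]; omega
        rw [htn, ← ht, List.length_append, Nat.add_sub_cancel, List.drop_left]
      simp only [Bool.and_eq_true, decide_eq_true_eq, PySem.Set.contains_iff]
      refine ⟨hle, ?_⟩
      rw [hslice]
      exact (PySem.Set.mem_ofList B b).mpr hbB

-- ===== VERDICT (by name: the statement is the Claim_ definition above) =====
theorem filter_list_by_endings_spec : Claim_equal_filter_list_by_endings := by
  intro A B _
  unfold Spec_filter_list_by_endings filter_list_by_endings filter_list_by_endings_alt
  congr 1
  funext C a_item
  simp only [pvCond_eq]
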